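-- pv_equiv track=rewrite | github.com/john-lee-santiago/Sudoku-Solver | cell.py | init_block
-- ===== SOURCE A (Python) =====
-- def init_block(row, column):
--   block_case = {
--     (range(0,3), range(0,3)): 0,
--     (range(0,3), range(3,6)): 1,
--     (range(0,3), range(6,9)): 2,
--     (range(3,6), range(0,3)): 3,
--     (range(3,6), range(3,6)): 4,
--     (range(3,6), range(6,9)): 5,
--     (range(6,9), range(0,3)): 6,
--     (range(6,9), range(3,6)): 7,
--     (range(6,9), range(6,9)): 8
--   }
--   for (range1, range2), block in block_case.items():
--     if row in range1 and column in range2: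
--       return block
-- ===== SOURCE B (Python) =====
-- def init_block(row, column):
--   # Closed form: block index = (row//3)*3 + column//3 inside the 9x9 grid.
--   if row in range(9) and column in range(9):
--     return (row // 3) * 3 + column // 3
-- ===== Notes on version B (the rewrite author's own statement) =====
-- stated objective: simpler
-- what changed: Replaced the 9-entry dict of range pairs and linear scan with the closed form (row//3)*3 + column//3 guarded by a range(9) membership test.
import Mathlib
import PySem

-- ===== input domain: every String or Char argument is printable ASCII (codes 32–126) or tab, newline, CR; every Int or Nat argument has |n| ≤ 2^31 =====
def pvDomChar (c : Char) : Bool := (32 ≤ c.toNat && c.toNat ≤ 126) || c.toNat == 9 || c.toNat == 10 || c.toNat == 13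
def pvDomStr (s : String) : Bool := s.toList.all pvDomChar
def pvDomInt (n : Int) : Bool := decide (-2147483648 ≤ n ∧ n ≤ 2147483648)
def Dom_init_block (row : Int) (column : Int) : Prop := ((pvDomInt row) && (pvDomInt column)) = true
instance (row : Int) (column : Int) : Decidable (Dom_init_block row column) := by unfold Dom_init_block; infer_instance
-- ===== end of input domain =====

-- B replaces A's dict of 9 range pairs and linear scan by the closed form (row//3)*3 + column//3 (simpler).

-- ===== PORT A =====
-- A's dict: the nine ((range1, range2), block) entries in insertion order.
def initBlockCases : List ((Int × Int) × (Int × Int) × Int) :=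
  [ ((0,3), (0,3), 0), ((0,3), (3,6), 1), ((0,3), (6,9), 2),
    ((3,6), (0,3), 3), ((3,6), (3,6), 4), ((3,6), (6,9), 5),
    ((6,9), (0,3), 6), ((6,9), (3,6), 7), ((6,9), (6,9), 8) ]

-- 'x in range(a,b)' for an Int x (step 1, a < b here) is a ≤ x < b
def inRange (x a b : Int) : Bool := decide (a ≤ x ∧ x < b)

-- the for-loop with early return: first matching case, else fall through to None
def initBlockLoop (row column : Int) : List ((Int × Int) × (Int × Int) × Int) → Option Int
  | [] => none
  | ((a1,b1),(a2,b2),blk) :: rest =>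
      if inRange row a1 b1 && inRange column a2 b2 then some blk
      else initBlockLoop row column rest

def init_block (row : Int) (column : Int) : Option Int :=
  initBlockLoop row column initBlockCases

-- ===== PORT B =====
def init_block_alt (row : Int) (column : Int) : Option Int :=
  if 0 ≤ row ∧ row < 9 ∧ 0 ≤ column ∧ column < 9 then
    some ((PySem.Int.floordiv row 3) * 3 + PySem.Int.floordiv column 3)
  else none

-- ===== PRECONDITION & SPEC =====
def Spec_init_block (row : Int) (column : Int) (out : Option Int) : Prop := out = init_block_alt row column
instance (row : Int) (column : Int) (out : Option Int) : Decidable (Spec_init_block row column out) := by unfold Spec_init_block; infer_instance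

-- ===== CLAIM (what is proved, stated in full; the proofs are below) =====
def Claim_equal_init_block : Prop := ∀ (row : Int) (column : Int), Dom_init_block row column → Spec_init_block row column (init_block row column)

-- ===== LEMMAS AND PROOFS =====

-- ===== VERDICT (by name: the statement is the Claim_ definition above) =====
theorem init_block_spec : Claim_equal_init_block := by
  intro row column _
  unfold Spec_init_block init_block init_block_alt
  rw [PySem.Int.floordiv_eq_ediv_of_pos (by norm_num : (0:Int) < 3),
      PySem.Int.floordiv_eq_ediv_of_pos (by norm_num : (0:Int) < 3)]
  simp only [initBlockCases, initBlockLoop, inRange, Bool.and_eq_true, decide_eq_true_eq]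
  split_ifs <;> simp_all <;> omega
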